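-- pv_equiv track=rewrite | github.com/ermanantrivedi/powerbiProject | PullDocFiles.py | find_best_column_match
-- ===== SOURCE A (Python) =====
-- def find_best_column_match(headers, desired):
--     desired_l = desired.lower()
--     for h in headers:
--         if h.lower() == desired_l:
--             return h
--     for h in headers:
--         if desired_l in h.lower():
--             return h
--     return None
-- ===== SOURCE B (Python) =====
-- def find_best_column_match(headers, desired):
--     desired_l = desired.lower()
--     candidate = None
--     for h in headers:
--         hl = h.lower()
--         if hl == desired_l:
--             return h
--         if candidate is None and desired_l in hl:
--             candidate = h
--     return candidate
-- ===== Notes on version B (the rewrite author's own statement) =====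
-- stated objective: alternative
-- what changed: Replaces A's two passes over headers with a single pass that returns an exact match immediately and records the first substring match as a fallback candidate, lowering each header once.
import Mathlib
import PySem

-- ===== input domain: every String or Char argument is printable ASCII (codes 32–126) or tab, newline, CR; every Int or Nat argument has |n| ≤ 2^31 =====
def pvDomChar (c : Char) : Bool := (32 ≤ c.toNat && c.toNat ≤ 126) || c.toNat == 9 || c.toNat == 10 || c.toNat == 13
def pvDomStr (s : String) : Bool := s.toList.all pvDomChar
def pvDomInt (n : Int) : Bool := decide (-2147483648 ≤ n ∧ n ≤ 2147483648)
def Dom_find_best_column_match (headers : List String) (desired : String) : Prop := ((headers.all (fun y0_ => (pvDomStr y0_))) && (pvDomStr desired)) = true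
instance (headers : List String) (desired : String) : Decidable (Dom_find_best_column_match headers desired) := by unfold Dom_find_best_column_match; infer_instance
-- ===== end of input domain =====

-- B merges A's two passes into one pass that records the first substring match as a fallback (same values; alternative decomposition).
-- ===== PORT A =====
-- loop 1: 'for h in headers: if h.lower() == desired_l: return h'
def pvALoop1 (headers : List String) (desired_l : String) : Option String :=
  match headers with
  | [] => none
  | h :: t => if PySem.Str.lower h = desired_l then some h else pvALoop1 t desired_l

-- loop 2: 'for h in headers: if desired_l in h.lower(): return h'
def pvALoop2 (headers : List String) (desired_l : String) : Option String :=
  match headers with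
  | [] => none
  | h :: t => if PySem.Str.isIn desired_l (PySem.Str.lower h) then some h else pvALoop2 t desired_l

def find_best_column_match (headers : List String) (desired : String) : Option String :=
  let desired_l := PySem.Str.lower desired
  match pvALoop1 headers desired_l with
  | some h => some h
  | none => pvALoop2 headers desired_l

-- ===== PORT B =====
-- single pass: return on exact match, record the first substring match in 'candidate'
def pvBLoop (headers : List String) (desired_l : String) (candidate : Option String) : Option String :=
  match headers with
  | [] => candidate
  | h :: t =>
    let hl := PySem.Str.lower h
    if hl = desired_l then some h
    else pvBLoop t desired_l
      (if candidate = none ∧ PySem.Str.isIn desired_l hl then some h else candidate)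

def find_best_column_match_alt (headers : List String) (desired : String) : Option String :=
  pvBLoop headers (PySem.Str.lower desired) none

-- ===== PRECONDITION & SPEC =====
def Spec_find_best_column_match (headers : List String) (desired : String) (out : Option String) : Prop := out = find_best_column_match_alt headers desired
instance (headers : List String) (desired : String) (out : Option String) : Decidable (Spec_find_best_column_match headers desired out) := by unfold Spec_find_best_column_match; infer_instance

-- ===== CLAIM (what is proved, stated in full; the proofs are below) =====
def Claim_equal_find_best_column_match : Prop := ∀ (headers : List String) (desired : String), Dom_find_best_column_match headers desired → Spec_find_best_column_match headers desired (find_best_column_match headers desired)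

-- ===== LEMMAS AND PROOFS =====

-- B's single pass equals: exact match if any, else the carried candidate, else A's substring pass.
theorem pvBLoop_eq (headers : List String) (d : String) (cand : Option String) :
    pvBLoop headers d cand =
      match pvALoop1 headers d with
      | some h => some h
      | none => match cand with
        | some c => some c
        | none => pvALoop2 headers d := by
  induction headers generalizing cand with
  | nil => cases cand <;> simp [pvBLoop, pvALoop1, pvALoop2]
  | cons h t ih =>
    by_cases he : PySem.Str.lower h = d
    · simp [pvBLoop, pvALoop1, he]
    · cases cand with
      | some c =>
        simp only [pvBLoop, pvALoop1, if_neg he]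
        rw [ih]
        simp
      | none =>
        by_cases hs : PySem.Str.isIn d (PySem.Str.lower h) = true <;>
          · simp only [pvBLoop, pvALoop1, pvALoop2, if_neg he, hs]
            rw [ih]
            simp

-- ===== VERDICT (by name: the statement is the Claim_ definition above) =====
theorem find_best_column_match_spec : Claim_equal_find_best_column_match := by
  intro headers desired _
  unfold Spec_find_best_column_match find_best_column_match find_best_column_match_alt
  rw [pvBLoop_eq]
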